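-- pv_equiv track=rewrite | github.com/MrBrantCode/unitest_baseline | mut_generate/mist_train_taco/taco_4936/solution.py | convert_identifier
-- ===== SOURCE A (Python) =====
-- def convert_identifier(identifier: str, current_convention: str, target_convention: str) -> str:
--     if current_convention == target_convention:
--         return identifier
--
--     if '_' in identifier:
--         parts = identifier.split('_')
--     else:
--         parts = []
--         j = 0
--         for i in range(1, len(identifier)):
--             if identifier[i].isupper():
--                 parts.append(identifier[j:i])
--                 j = i
--         parts.append(identifier[j:])
--
--     if target_convention == 'D':
--         parts = map(str.lower, parts)
--         return '_'.join(parts)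
--     else:
--         parts = ''.join(map(str.capitalize, parts))
--         if target_convention == 'L':
--             parts = parts[0].lower() + parts[1:]
--         return parts
-- ===== SOURCE B (Python) =====
-- def convert_identifier(identifier: str, current_convention: str, target_convention: str) -> str:
--     if current_convention == target_convention:
--         return identifier
--     has_us = '_' in identifier
--     out = []
--     new_word = True
--     for ch in identifier:
--         if has_us and ch == '_':
--             if target_convention == 'D':
--                 out.append('_')
--             new_word = True
--         elif target_convention == 'D':
--             if not has_us and not new_word and ch.isupper():
--                 out.append('_')
--             out.append(ch.lower())
--             new_word = False
--         elif new_word or (not has_us and ch.isupper()):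
--             out.append(ch.upper())
--             new_word = False
--         else:
--             out.append(ch.lower())
--             new_word = False
--     res = ''.join(out)
--     if target_convention == 'L':
--         res = res[0].lower() + res[1:]
--     return res
-- ===== Notes on version B (the rewrite author's own statement) =====
-- stated objective: alternative
-- what changed: B replaces A's split-into-parts-then-map-then-join pipeline (with a slice-collecting index loop for camelCase) by a single-pass character state machine that emits the output directly while tracking a new-word flag; the empty-output IndexError of target 'L' is excluded by Pre_.
import Mathlib
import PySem

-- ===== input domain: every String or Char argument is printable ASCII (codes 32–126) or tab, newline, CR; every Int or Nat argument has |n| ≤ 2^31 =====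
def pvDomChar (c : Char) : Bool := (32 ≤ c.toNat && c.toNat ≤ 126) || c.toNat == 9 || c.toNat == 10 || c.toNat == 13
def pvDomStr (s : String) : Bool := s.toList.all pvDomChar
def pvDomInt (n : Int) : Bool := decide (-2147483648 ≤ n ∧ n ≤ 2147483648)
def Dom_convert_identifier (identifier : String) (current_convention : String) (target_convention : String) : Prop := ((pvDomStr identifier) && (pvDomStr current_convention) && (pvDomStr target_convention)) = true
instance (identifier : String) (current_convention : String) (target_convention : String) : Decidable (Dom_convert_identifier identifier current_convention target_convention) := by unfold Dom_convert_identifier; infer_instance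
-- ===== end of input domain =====

-- B replaces A's split-parts/map/join pipeline by a single-pass character state machine
-- with a new-word flag (objective: alternative; same O(n) cost; return values proved equal on Pre_).


-- ===== PORT A =====
-- str.capitalize(part): first char upper-cased, rest lower-cased (exact on ASCII, the stated domain)
def pvCapitalize (p : List Char) : List Char :=
  match p with
  | [] => []
  | c :: rest => PySem.Chars.upperChar c :: rest.map PySem.Chars.lowerChar

-- one step of A's camelCase loop: `if identifier[i].isupper(): parts.append(identifier[j:i]); j = i`
def pvCamelStep (l : List Char) (st : List (List Char) × Int) (i : Int) : List (List Char) × Int :=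
  match PySem.List.pyGet? l i with
  | some c =>
      if PySem.Chars.isupper c then (st.1 ++ [PySem.List.slice l (some st.2) (some i)], i)
      else st
  | none => st

def convert_identifier (identifier : String) (current_convention : String) (target_convention : String) : String :=
  if current_convention == target_convention then identifier
  else
    let l := identifier.toList
    let parts : List (List Char) :=
      if PySem.Chars.isIn ['_'] l then PySem.Chars.splitOn l ['_']
      else
        let st := (PySem.List.pyRange 1 (l.length : Int) 1).foldl (pvCamelStep l) ([], 0)
        st.1 ++ [PySem.List.slice l (some st.2) none]
    if target_convention == "D" then
      String.ofList (PySem.Chars.join ['_'] (parts.map PySem.Chars.lower))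
    else
      let s := PySem.Chars.join [] (parts.map pvCapitalize)
      if target_convention == "L" then
        match s with
        | [] => String.ofList []          -- Python raises IndexError here; excluded by Pre_
        | c :: rest => String.ofList (PySem.Chars.lowerChar c :: rest)   -- parts[0].lower() + parts[1:]
      else String.ofList s

-- ===== PORT B =====
-- one step of B's single-pass loop over the characters
def pvAltStep (has_us : Bool) (target_convention : String)
    (st : List Char × Bool) (ch : Char) : List Char × Bool :=
  if has_us && (ch == '_') then
    (st.1 ++ (if target_convention == "D" then ['_'] else []), true)
  else if target_convention == "D" then
    (st.1 ++ (if !has_us && !st.2 && PySem.Chars.isupper ch then ['_'] else [])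
          ++ [PySem.Chars.lowerChar ch], false)
  else if st.2 || (!has_us && PySem.Chars.isupper ch) then
    (st.1 ++ [PySem.Chars.upperChar ch], false)
  else
    (st.1 ++ [PySem.Chars.lowerChar ch], false)

def convert_identifier_alt (identifier : String) (current_convention : String) (target_convention : String) : String :=
  if current_convention == target_convention then identifier
  else
    let l := identifier.toList
    let has_us := PySem.Chars.isIn ['_'] l
    let res := (l.foldl (pvAltStep has_us target_convention) ([], true)).1
    if target_convention == "L" then
      match res with
      | [] => String.ofList []            -- Python raises IndexError here; excluded by Pre_
      | c :: rest => String.ofList (PySem.Chars.lowerChar c :: rest)   -- res[0].lower() + res[1:]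
    else String.ofList res

-- ===== PRECONDITION & SPEC =====
-- Pre_ excludes exactly the inputs where both Pythons raise IndexError: target 'L' (with a real
-- conversion requested) on an identifier consisting only of underscores (or empty).
def Pre_convert_identifier (identifier : String) (current_convention : String) (target_convention : String) : Prop :=
  ¬ (current_convention ≠ target_convention ∧ target_convention = "L" ∧
     identifier.toList.all (fun c => c == '_') = true)
instance (identifier : String) (current_convention : String) (target_convention : String) : Decidable (Pre_convert_identifier identifier current_convention target_convention) := by unfold Pre_convert_identifier; infer_instance

def pvWitness_convert_identifier : String × String × String := ("foo_barBaz", "C", "L")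

def Spec_convert_identifier (identifier : String) (current_convention : String) (target_convention : String) (out : String) : Prop := out = convert_identifier_alt identifier current_convention target_convention
instance (identifier : String) (current_convention : String) (target_convention : String) (out : String) : Decidable (Spec_convert_identifier identifier current_convention target_convention out) := by unfold Spec_convert_identifier; infer_instance

-- ===== CLAIM (what is proved, stated in full; the proofs are below) =====
def Claim_equal_convert_identifier : Prop := ∀ (identifier : String) (current_convention : String) (target_convention : String), Dom_convert_identifier identifier current_convention target_convention → Pre_convert_identifier identifier current_convention target_convention → Spec_convert_identifier identifier current_convention target_convention (convert_identifier identifier current_convention target_convention)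

-- ===== LEMMAS AND PROOFS =====

-- ---------- spec-side split functions ----------
def pvConsF (c : Char) : List (List Char) → List (List Char)
  | [] => [[c]]
  | p :: ps => (c :: p) :: ps

def pvSplitU : List Char → List (List Char)
  | [] => [[]]
  | c :: xs => if c = '_' then [] :: pvSplitU xs else pvConsF c (pvSplitU xs)

def pvSplitC : List Char → List (List Char)
  | [] => [[]]
  | c :: xs => if PySem.Chars.isupper c then [] :: pvConsF c (pvSplitC xs) else pvConsF c (pvSplitC xs)

def pvCamel : List Char → List (List Char)
  | [] => [[]]
  | c :: xs => pvConsF c (pvSplitC xs)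

def pvAppLast : List (List Char) → Char → List (List Char)
  | [], c => [[c]]
  | [p], c => [p ++ [c]]
  | p :: ps, c => p :: pvAppLast ps c

-- ---------- per-character output specs (one per mode) ----------
def pvGU : List Char → Bool → List Char
  | [], _ => []
  | c :: xs, nw =>
      if c = '_' then pvGU xs true
      else (if nw then PySem.Chars.upperChar c else PySem.Chars.lowerChar c) :: pvGU xs false

def pvGCD : List Char → Bool → List Char
  | [], _ => []
  | c :: xs, nw =>
      (if !nw && PySem.Chars.isupper c then ['_'] else []) ++ PySem.Chars.lowerChar c :: pvGCD xs false

def pvGCP : List Char → Bool → List Char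
  | [], _ => []
  | c :: xs, nw =>
      (if nw || PySem.Chars.isupper c then PySem.Chars.upperChar c else PySem.Chars.lowerChar c) :: pvGCP xs false

-- ---------- tiny list/join facts ----------
theorem pvSplitU_ne_nil (l : List Char) : pvSplitU l ≠ [] := by
  cases l with
  | nil => simp [pvSplitU]
  | cons c xs =>
    simp only [pvSplitU]
    split
    · simp
    · cases h : pvSplitU xs <;> simp [pvConsF]

theorem pvSplitC_ne_nil (l : List Char) : pvSplitC l ≠ [] := by
  cases l with
  | nil => simp [pvSplitC]
  | cons c xs =>
    simp only [pvSplitC]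
    split <;> [simp; skip] <;> cases h : pvSplitC xs <;> simp [pvConsF]

theorem pvJoin_cons_cons (sep x y : List Char) (zs : List (List Char)) :
    PySem.Chars.join sep (x :: y :: zs) = x ++ sep ++ PySem.Chars.join sep (y :: zs) := by
  simp [PySem.Chars.join, List.intercalate, List.intersperse]

theorem pvJoin_singleton (sep x : List Char) : PySem.Chars.join sep [x] = x := by
  simp [PySem.Chars.join, List.intercalate]

theorem pvJoin_cons_head (sep : List Char) (c : Char) (p : List Char) (ps : List (List Char)) :
    PySem.Chars.join sep ((c :: p) :: ps) = c :: PySem.Chars.join sep (p :: ps) := by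
  cases ps with
  | nil => simp [pvJoin_singleton]
  | cons q qs => simp [pvJoin_cons_cons]

theorem pvLowerChar_us : PySem.Chars.lowerChar '_' = '_' := by decide

theorem pvGo_spec (l : List Char) : ∀ (fuel : Nat) (cur acc : List Char) (accs : List (List Char))
    (p : List Char) (ps : List (List Char)), l.length < fuel → pvSplitU l = p :: ps →
    PySem.Chars.splitOn.go ['_'] fuel l cur accs = accs.reverse ++ (cur.reverse ++ p) :: ps := by
  induction l with
  | nil =>
    intro fuel cur acc accs p ps hf hs
    cases fuel with
    | zero => omega
    | succ n =>
      simp [pvSplitU] at hs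
      obtain ⟨hp, hps⟩ := hs
      subst hp; subst hps
      simp [PySem.Chars.splitOn.go]
  | cons c xs ih =>
    intro fuel cur acc accs p ps hf hs
    cases fuel with
    | zero => omega
    | succ n =>
      by_cases hc : c = '_'
      · subst hc
        simp only [pvSplitU, if_pos rfl] at hs
        obtain ⟨q, qs, hq⟩ : ∃ q qs, pvSplitU xs = q :: qs := by
          cases h : pvSplitU xs with
          | nil => exact absurd h (pvSplitU_ne_nil xs)
          | cons q qs => exact ⟨q, qs, rfl⟩
        rw [hq] at hs
        obtain ⟨hp, hps⟩ := List.cons.inj hs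
        subst hp; subst hps
        rw [show PySem.Chars.splitOn.go ['_'] (n+1) ('_' :: xs) cur accs
              = PySem.Chars.splitOn.go ['_'] n xs [] (cur.reverse :: accs) from by
          simp [PySem.Chars.splitOn.go, List.isPrefixOf]]
        rw [ih n [] acc (cur.reverse :: accs) q qs (by simp at hf ⊢; omega) hq]
        simp
      · simp only [pvSplitU, if_neg hc] at hs
        obtain ⟨q, qs, hq⟩ : ∃ q qs, pvSplitU xs = q :: qs := by
          cases h : pvSplitU xs with
          | nil => exact absurd h (pvSplitU_ne_nil xs)
          | cons q qs => exact ⟨q, qs, rfl⟩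
        rw [hq] at hs
        simp only [pvConsF] at hs
        obtain ⟨hp, hps⟩ := List.cons.inj hs
        subst hp; subst hps
        rw [show PySem.Chars.splitOn.go ['_'] (n+1) (c :: xs) cur accs
              = PySem.Chars.splitOn.go ['_'] n xs (c :: cur) accs from by
          simp [PySem.Chars.splitOn.go, List.isPrefixOf, Ne.symm hc]]
        rw [ih n (c :: cur) acc accs q qs (by simp at hf ⊢; omega) hq]
        simp
theorem pvSplitOn_eq (l : List Char) : PySem.Chars.splitOn l ['_'] = pvSplitU l := by
  obtain ⟨p, ps, h⟩ : ∃ p ps, pvSplitU l = p :: ps := by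
    cases h : pvSplitU l with
    | nil => exact absurd h (pvSplitU_ne_nil l)
    | cons p ps => exact ⟨p, ps, rfl⟩
  rw [PySem.Chars.splitOn, pvGo_spec l (l.length + 1) [] [] [] p ps (by omega) h, h]
  simp
theorem pvBU_D (l : List Char) : ∀ (out : List Char) (nw : Bool),
    (l.foldl (pvAltStep true "D") (out, nw)).1 = out ++ l.map PySem.Chars.lowerChar := by
  induction l with
  | nil => intro out nw; simp
  | cons c xs ih =>
    intro out nw
    by_cases hc : c = '_'
    · subst hc
      simp only [List.foldl_cons, pvAltStep]
      norm_num
      rw [ih]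
      simp [PySem.Chars.lowerChar, PySem.Chars.isupper]
    · simp only [List.foldl_cons, pvAltStep]
      have : (c == '_') = false := by simp [hc]
      simp only [this, Bool.true_and, Bool.false_eq_true, if_false]
      norm_num
      rw [ih]
      simp

theorem pvBU_P (tgt : String) (hD : (tgt == "D") = false) (l : List Char) :
    ∀ (out : List Char) (nw : Bool),
    (l.foldl (pvAltStep true tgt) (out, nw)).1 = out ++ pvGU l nw := by
  induction l with
  | nil => intro out nw; simp [pvGU]
  | cons c xs ih =>
    intro out nw
    by_cases hc : c = '_'
    · subst hc
      simp only [List.foldl_cons, pvAltStep, hD]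
      norm_num
      rw [ih]
      simp [pvGU]
    · have hcb : (c == '_') = false := by simp [hc]
      simp only [List.foldl_cons, pvAltStep, hD, hcb, Bool.true_and, Bool.false_eq_true, if_false]
      norm_num
      rw [ih]
      by_cases hnw : nw <;> simp [pvGU, hc, hnw]

theorem pvBC_D (l : List Char) : ∀ (out : List Char) (nw : Bool),
    (l.foldl (pvAltStep false "D") (out, nw)).1 = out ++ pvGCD l nw := by
  induction l with
  | nil => intro out nw; simp [pvGCD]
  | cons c xs ih =>
    intro out nw
    simp only [List.foldl_cons, pvAltStep, Bool.false_and, Bool.false_eq_true, if_false]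
    norm_num
    rw [ih]
    by_cases hnw : nw <;> by_cases hu : PySem.Chars.isupper c <;> simp [pvGCD, hnw, hu]

theorem pvBC_P (tgt : String) (hD : (tgt == "D") = false) (l : List Char) :
    ∀ (out : List Char) (nw : Bool),
    (l.foldl (pvAltStep false tgt) (out, nw)).1 = out ++ pvGCP l nw := by
  induction l with
  | nil => intro out nw; simp [pvGCP]
  | cons c xs ih =>
    intro out nw
    simp only [List.foldl_cons, pvAltStep, hD, Bool.false_and, Bool.false_eq_true, if_false]
    norm_num
    rw [ih]
    by_cases hnw : nw <;> by_cases hu : PySem.Chars.isupper c <;> simp [pvGCP, hnw, hu]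
theorem pvSplitU_cons' (xs : List Char) : ∃ p ps, pvSplitU xs = p :: ps := by
  cases h : pvSplitU xs with
  | nil => exact absurd h (pvSplitU_ne_nil xs)
  | cons p ps => exact ⟨p, ps, rfl⟩

theorem pvSplitC_cons' (xs : List Char) : ∃ p ps, pvSplitC xs = p :: ps := by
  cases h : pvSplitC xs with
  | nil => exact absurd h (pvSplitC_ne_nil xs)
  | cons p ps => exact ⟨p, ps, rfl⟩

theorem pvJoin_nil_eq_flatten (ps : List (List Char)) : PySem.Chars.join [] ps = ps.flatten := by
  induction ps with
  | nil => simp [PySem.Chars.join, List.intercalate]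
  | cons p qs ih =>
    cases qs with
    | nil => simp [pvJoin_singleton]
    | cons q qs' => rw [pvJoin_cons_cons]; rw [ih]; simp

theorem pvJoin_us (x p : List Char) (ps : List (List Char)) :
    PySem.Chars.join ['_'] (x :: p :: ps) = x ++ '_' :: PySem.Chars.join ['_'] (p :: ps) := by
  rw [pvJoin_cons_cons]; simp

theorem pvAU_D (l : List Char) :
    PySem.Chars.join ['_'] ((pvSplitU l).map PySem.Chars.lower) = l.map PySem.Chars.lowerChar := by
  induction l with
  | nil => simp [pvSplitU, pvJoin_singleton, PySem.Chars.lower]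
  | cons c xs ih =>
    obtain ⟨p, ps, hq⟩ := pvSplitU_cons' xs
    rw [hq] at ih
    by_cases hc : c = '_'
    · subst hc
      simp only [List.map_cons] at ih
      rw [show pvSplitU ('_' :: xs) = [] :: pvSplitU xs from by simp [pvSplitU], hq,
          List.map_cons, List.map_cons, pvJoin_us, ih]
      simp [pvLowerChar_us, PySem.Chars.lower]
    · rw [show pvSplitU (c :: xs) = pvConsF c (pvSplitU xs) from by simp [pvSplitU, hc], hq]
      simp only [pvConsF, List.map_cons]
      rw [show PySem.Chars.lower (c :: p) = PySem.Chars.lowerChar c :: PySem.Chars.lower p from by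
            simp [PySem.Chars.lower],
          pvJoin_cons_head,
          show PySem.Chars.lower p :: List.map PySem.Chars.lower ps
              = List.map PySem.Chars.lower (p :: ps) from rfl,
          ih]

theorem pvAU_P_aux (l : List Char) :
    PySem.Chars.join [] ((pvSplitU l).map pvCapitalize) = pvGU l true ∧
    (∀ p ps, pvSplitU l = p :: ps →
      pvGU l false = p.map PySem.Chars.lowerChar ++ ((ps.map pvCapitalize).flatten)) := by
  induction l with
  | nil =>
    refine ⟨by simp [pvSplitU, pvJoin_singleton, pvCapitalize, pvGU], ?_⟩
    intro p ps h
    simp [pvSplitU] at h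
    obtain ⟨h1, h2⟩ := h; subst h1; subst h2
    simp [pvGU]
  | cons c xs ih =>
    obtain ⟨ihT, ihF⟩ := ih
    obtain ⟨p, ps, hq⟩ := pvSplitU_cons' xs
    rw [pvJoin_nil_eq_flatten] at ihT ⊢
    by_cases hc : c = '_'
    · subst hc
      have hsp : pvSplitU ('_' :: xs) = [] :: pvSplitU xs := by simp [pvSplitU]
      refine ⟨?_, ?_⟩
      · rw [hsp, List.map_cons, List.flatten_cons, show pvCapitalize [] = [] from rfl,
            List.nil_append, ihT]
        simp [pvGU]
      · intro p' ps' h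
        rw [hsp, hq] at h
        obtain ⟨h1, h2⟩ := List.cons.inj h; subst h1; subst h2
        rw [show pvGU ('_' :: xs) false = pvGU xs true from by simp [pvGU], ← ihT, hq]
        simp
    · have hsp : pvSplitU (c :: xs) = pvConsF c (pvSplitU xs) := by simp [pvSplitU, hc]
      have key : (pvCapitalize (c :: p)) ++ (ps.map pvCapitalize).flatten
          = PySem.Chars.upperChar c :: pvGU xs false := by
        rw [ihF p ps hq]
        simp [pvCapitalize]
      refine ⟨?_, ?_⟩
      · rw [hsp, hq]
        simp only [pvConsF, List.map_cons, List.flatten_cons, ← List.append_assoc]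
        rw [show pvCapitalize (c :: p) ++ (ps.map pvCapitalize).flatten
              = PySem.Chars.upperChar c :: pvGU xs false from key]
        simp [pvGU, hc]
      · intro p' ps' h
        rw [hsp, hq] at h
        simp only [pvConsF] at h
        obtain ⟨h1, h2⟩ := List.cons.inj h; subst h1; subst h2
        rw [show pvGU (c :: xs) false = PySem.Chars.lowerChar c :: pvGU xs false from by
              simp [pvGU, hc], ihF p ps hq]
        simp
theorem pvT_D (xs : List Char) :
    PySem.Chars.join ['_'] ((pvSplitC xs).map PySem.Chars.lower) = pvGCD xs false := by
  induction xs with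
  | nil => simp [pvSplitC, pvJoin_singleton, PySem.Chars.lower, pvGCD]
  | cons c r ih =>
    obtain ⟨p, ps, hq⟩ := pvSplitC_cons' r
    rw [hq] at ih
    by_cases hu : PySem.Chars.isupper c
    · rw [show pvSplitC (c :: r) = [] :: pvConsF c (pvSplitC r) from by simp [pvSplitC, hu], hq]
      simp only [pvConsF, List.map_cons, pvJoin_us]
      rw [show PySem.Chars.lower (c :: p) = PySem.Chars.lowerChar c :: PySem.Chars.lower p from by
            simp [PySem.Chars.lower],
          pvJoin_cons_head,
          show PySem.Chars.lower p :: List.map PySem.Chars.lower ps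
              = List.map PySem.Chars.lower (p :: ps) from rfl,
          ih]
      simp [pvGCD, hu, PySem.Chars.lower]
    · rw [show pvSplitC (c :: r) = pvConsF c (pvSplitC r) from by simp [pvSplitC, hu], hq]
      simp only [pvConsF, List.map_cons]
      rw [show PySem.Chars.lower (c :: p) = PySem.Chars.lowerChar c :: PySem.Chars.lower p from by
            simp [PySem.Chars.lower],
          pvJoin_cons_head,
          show PySem.Chars.lower p :: List.map PySem.Chars.lower ps
              = List.map PySem.Chars.lower (p :: ps) from rfl,
          ih]
      simp [pvGCD, hu]

theorem pvT_P (xs : List Char) : ∀ p ps, pvSplitC xs = p :: ps →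
    p.map PySem.Chars.lowerChar ++ ((ps.map pvCapitalize).flatten) = pvGCP xs false := by
  induction xs with
  | nil =>
    intro p ps h
    simp [pvSplitC] at h
    obtain ⟨h1, h2⟩ := h; subst h1; subst h2
    simp [pvGCP]
  | cons c r ih =>
    intro p' ps' h
    obtain ⟨p, ps, hq⟩ := pvSplitC_cons' r
    by_cases hu : PySem.Chars.isupper c
    · rw [show pvSplitC (c :: r) = [] :: pvConsF c (pvSplitC r) from by simp [pvSplitC, hu], hq] at h
      simp only [pvConsF] at h
      obtain ⟨h1, h2⟩ := List.cons.inj h; subst h1; subst h2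
      simp only [List.map_nil, List.nil_append, List.map_cons, List.flatten_cons, pvCapitalize]
      simp only [List.cons_append]
      rw [ih p ps hq]
      simp [pvGCP, hu]
    · rw [show pvSplitC (c :: r) = pvConsF c (pvSplitC r) from by simp [pvSplitC, hu], hq] at h
      simp only [pvConsF] at h
      obtain ⟨h1, h2⟩ := List.cons.inj h; subst h1; subst h2
      simp only [List.map_cons, List.cons_append]
      rw [ih p ps hq]
      simp [pvGCP, hu]

theorem pvAC_D (l : List Char) :
    PySem.Chars.join ['_'] ((pvCamel l).map PySem.Chars.lower) = pvGCD l true := by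
  cases l with
  | nil => simp [pvCamel, pvJoin_singleton, PySem.Chars.lower, pvGCD]
  | cons c xs =>
    obtain ⟨p, ps, hq⟩ := pvSplitC_cons' xs
    rw [show pvCamel (c :: xs) = pvConsF c (pvSplitC xs) from rfl, hq]
    simp only [pvConsF, List.map_cons]
    rw [show PySem.Chars.lower (c :: p) = PySem.Chars.lowerChar c :: PySem.Chars.lower p from by
          simp [PySem.Chars.lower],
        pvJoin_cons_head,
        show PySem.Chars.lower p :: List.map PySem.Chars.lower ps
            = List.map PySem.Chars.lower (p :: ps) from rfl,
        ← hq, pvT_D]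
    simp [pvGCD]

theorem pvAC_P (l : List Char) :
    PySem.Chars.join [] ((pvCamel l).map pvCapitalize) = pvGCP l true := by
  cases l with
  | nil => simp [pvCamel, pvJoin_singleton, pvCapitalize, pvGCP]
  | cons c xs =>
    obtain ⟨p, ps, hq⟩ := pvSplitC_cons' xs
    rw [pvJoin_nil_eq_flatten, show pvCamel (c :: xs) = pvConsF c (pvSplitC xs) from rfl, hq]
    simp only [pvConsF, List.map_cons, List.flatten_cons, pvCapitalize]
    simp only [List.cons_append]
    rw [pvT_P xs p ps hq]
    simp [pvGCP]
theorem pvConsF_append (x : Char) (p : List Char) (ps qs : List (List Char)) :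
    pvConsF x ((p :: ps) ++ qs) = pvConsF x (p :: ps) ++ qs := by
  simp [pvConsF]

theorem pvConsF_appLast (x : Char) (c : Char) (p : List Char) (ps : List (List Char)) :
    pvConsF x (pvAppLast (p :: ps) c) = pvAppLast (pvConsF x (p :: ps)) c := by
  cases ps with
  | nil => simp [pvAppLast, pvConsF]
  | cons q qs => simp [pvAppLast, pvConsF]

theorem pvSplitC_snoc (xs : List Char) (c : Char) :
    pvSplitC (xs ++ [c]) = if PySem.Chars.isupper c then pvSplitC xs ++ [[c]]
      else pvAppLast (pvSplitC xs) c := by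
  induction xs with
  | nil =>
    by_cases hu : PySem.Chars.isupper c <;>
      simp [pvSplitC, pvConsF, pvAppLast, hu]
  | cons x r ih =>
    obtain ⟨p, ps, hq⟩ := pvSplitC_cons' r
    by_cases hu : PySem.Chars.isupper c
    · simp only [hu, if_true] at ih ⊢
      rw [List.cons_append, show pvSplitC (x :: (r ++ [c]))
            = if PySem.Chars.isupper x then [] :: pvConsF x (pvSplitC (r ++ [c]))
              else pvConsF x (pvSplitC (r ++ [c])) from rfl, ih, hq,
          show pvSplitC (x :: r) = if PySem.Chars.isupper x then [] :: pvConsF x (pvSplitC r)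
              else pvConsF x (pvSplitC r) from rfl, hq]
      by_cases hx : PySem.Chars.isupper x <;>
        simp [hx, pvConsF]
    · simp only [hu, if_false, Bool.false_eq_true] at ih ⊢
      rw [List.cons_append, show pvSplitC (x :: (r ++ [c]))
            = if PySem.Chars.isupper x then [] :: pvConsF x (pvSplitC (r ++ [c]))
              else pvConsF x (pvSplitC (r ++ [c])) from rfl, ih, hq,
          show pvSplitC (x :: r) = if PySem.Chars.isupper x then [] :: pvConsF x (pvSplitC r)
              else pvConsF x (pvSplitC r) from rfl, hq]
      by_cases hx : PySem.Chars.isupper x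
      · simp only [hx, if_true]
        rw [pvConsF_appLast]
        cases ps with
        | nil => simp [pvAppLast, pvConsF]
        | cons q qs => simp [pvAppLast, pvConsF]
      · simp only [hx, if_false, Bool.false_eq_true]
        rw [pvConsF_appLast]

theorem pvCamel_snoc (xs : List Char) (hne : xs ≠ []) (c : Char) :
    pvCamel (xs ++ [c]) = if PySem.Chars.isupper c then pvCamel xs ++ [[c]]
      else pvAppLast (pvCamel xs) c := by
  cases xs with
  | nil => exact absurd rfl hne
  | cons x r =>
    obtain ⟨p, ps, hq⟩ := pvSplitC_cons' r
    rw [List.cons_append, show pvCamel (x :: (r ++ [c])) = pvConsF x (pvSplitC (r ++ [c])) from rfl,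
        pvSplitC_snoc, show pvCamel (x :: r) = pvConsF x (pvSplitC r) from rfl, hq]
    by_cases hu : PySem.Chars.isupper c
    · simp only [hu, if_true]
      rw [pvConsF_append]
    · simp only [hu, if_false, Bool.false_eq_true]
      rw [pvConsF_appLast]

theorem pvAppLast_snoc (qs : List (List Char)) (p : List Char) (c : Char) :
    pvAppLast (qs ++ [p]) c = qs ++ [p ++ [c]] := by
  induction qs with
  | nil => simp [pvAppLast]
  | cons q rs ih =>
    cases h : rs ++ [p] with
    | nil => exact absurd h (by simp)
    | cons a as =>
      rw [List.cons_append, h, show pvAppLast (q :: a :: as) c = q :: pvAppLast (a :: as) c from rfl,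
          ← h, ih]
      simp
theorem pvCamelFold_inv (l : List Char) : ∀ k : Nat, 1 ≤ k → k ≤ l.length →
    ∃ (acc : List (List Char)) (j : Nat),
      (PySem.List.pyRange 1 (k : Int) 1).foldl (pvCamelStep l) ([], 0) = (acc, (j : Int)) ∧
      j < k ∧ acc ++ [(l.drop j).take (k - j)] = pvCamel (l.take k) := by
  intro k
  induction k with
  | zero => omega
  | succ n ih =>
    intro _ hle
    by_cases hn : n = 0
    · subst hn
      refine ⟨[], 0, ?_, by omega, ?_⟩
      · rw [show ((1:Nat) : Int) = 1 from rfl, PySem.List.pyRange_one_eq_nil (by omega)]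
        rfl
      · cases l with
        | nil => simp at hle
        | cons c rest => simp [pvCamel, pvSplitC, pvConsF]
    · have h1n : 1 ≤ n := by omega
      have hnl : n < l.length := by omega
      obtain ⟨acc, j, hfold, hjk, hinv⟩ := ih h1n (by omega)
      have hrange : PySem.List.pyRange 1 ((n+1 : Nat) : Int) 1
          = PySem.List.pyRange 1 (n : Nat) 1 ++ [(n : Int)] := by
        push_cast
        exact PySem.List.pyRange_one_succ_right (by exact_mod_cast h1n)
      rw [hrange, List.foldl_append, hfold]
      have hget : PySem.List.pyGet? l ((n : Nat) : Int) = some l[n] := by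
        rw [PySem.List.pyGet?_natCast]
        simp [hnl]
      have htake : l.take (n+1) = l.take n ++ [l[n]] := by
        rw [List.take_succ]
        simp [hnl]
      have htkne : l.take n ≠ [] := by
        have : (l.take n).length = n := by simp; omega
        intro h; rw [h] at this; simp at this; omega
      by_cases hu : PySem.Chars.isupper l[n]
      · refine ⟨acc ++ [PySem.List.slice l (some (j : Int)) (some ((n : Nat) : Int))], n, ?_, by omega, ?_⟩
        · simp only [List.foldl_cons, List.foldl_nil, pvCamelStep, hget, hu, if_true]
        · rw [htake, pvCamel_snoc _ htkne, if_pos hu, ← hinv,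
              PySem.List.slice_natCast]
          have h1 : (l.drop n).take (n + 1 - n) = [l[n]] := by
            simp [List.take_one, List.head?_drop, hnl]
          rw [h1]
      · refine ⟨acc, j, ?_, by omega, ?_⟩
        · simp only [List.foldl_cons, List.foldl_nil, pvCamelStep, hget, hu]
          simp
        · rw [htake, pvCamel_snoc _ htkne, if_neg (by simp [hu]), ← hinv,
              pvAppLast_snoc]
          have : (l.drop j).take (n + 1 - j) = (l.drop j).take (n - j) ++ [l[n]] := by
            rw [show n + 1 - j = (n - j) + 1 from by omega, List.take_succ,
                List.getElem?_drop, show j + (n - j) = n from by omega]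
            simp [hnl]
          rw [this]

theorem pvCamelFold_eq (l : List Char) :
    (fun st => st.1 ++ [PySem.List.slice l (some st.2) none])
      ((PySem.List.pyRange 1 (l.length : Int) 1).foldl (pvCamelStep l) ([], 0)) = pvCamel l := by
  by_cases h0 : l.length = 0
  · have : l = [] := List.length_eq_zero_iff.mp h0
    subst this
    rw [show ((List.length [] : Nat) : Int) = 0 from by simp,
        PySem.List.pyRange_one_eq_nil (by omega)]
    simp [pvCamel, PySem.List.slice_from ([] : List Char) (le_refl 0)]
  · obtain ⟨acc, j, hfold, hjk, hinv⟩ := pvCamelFold_inv l l.length (by omega) (le_refl _)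
    rw [hfold]
    simp only
    rw [PySem.List.slice_from l (by positivity), Int.toNat_natCast]
    have ht : (l.drop j).take (l.length - j) = l.drop j := by
      apply List.take_of_length_le
      simp
    rw [ht, List.take_length] at hinv
    exact hinv

-- ===== VERDICT (by name: the statement is the Claim_ definition above) =====
theorem convert_identifier_spec : Claim_equal_convert_identifier := by
  unfold Claim_equal_convert_identifier
  intro ids cur tgt hdom hpre
  unfold Spec_convert_identifier convert_identifier convert_identifier_alt
  by_cases hct : (cur == tgt) = true
  · simp [hct]
  · have hct' : (cur == tgt) = false := by simpa using hct
    simp only [hct', Bool.false_eq_true, if_false]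
    by_cases hus : PySem.Chars.isIn ['_'] ids.toList = true
    · simp only [hus, if_true, pvSplitOn_eq]
      by_cases hD : (tgt == "D") = true
      · have htgt : tgt = "D" := eq_of_beq hD
        subst htgt
        simp only [show (("D":String) == "D") = true from by decide, if_true,
                   show (("D":String) == "L") = false from by decide, Bool.false_eq_true, if_false]
        rw [pvAU_D, pvBU_D ids.toList [] true]
        simp only [List.nil_append]
      · have hD' : (tgt == "D") = false := by simpa using hD
        simp only [hD', Bool.false_eq_true, if_false]
        rw [(pvAU_P_aux ids.toList).1, pvBU_P tgt hD' ids.toList [] true]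
        simp only [List.nil_append]
    · have hus' : PySem.Chars.isIn ['_'] ids.toList = false := by simpa using hus
      simp only [hus', Bool.false_eq_true, if_false]
      have hcf := pvCamelFold_eq ids.toList
      simp only at hcf
      rw [hcf]
      by_cases hD : (tgt == "D") = true
      · have htgt : tgt = "D" := eq_of_beq hD
        subst htgt
        simp only [show (("D":String) == "D") = true from by decide, if_true,
                   show (("D":String) == "L") = false from by decide, Bool.false_eq_true, if_false]
        rw [pvAC_D, pvBC_D ids.toList [] true]
        simp only [List.nil_append]
      · have hD' : (tgt == "D") = false := by simpa using hD
        simp only [hD', Bool.false_eq_true, if_false]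
        rw [pvAC_P, pvBC_P tgt hD' ids.toList [] true]
        simp only [List.nil_append]
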